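-- pv_equiv track=rewrite | github.com/jennyzzt/LLM_debate_on_ARC | ARC_gen_agents3_rounds2_openai/6c434453/agent2/algo1.py | solve
-- ===== SOURCE A (Python) =====
-- def solve(input_grid):
--     rows = len(input_grid)
--     cols = len(input_grid[0]) if rows > 0 else 0
--
--     # Initialize the output grid with zeros
--     output_grid = [[0 for _ in range(cols)] for _ in range(rows)]
--
--     # Function to check if a cell is part of a horizontal or vertical line of three or more '1's
--     def is_part_of_line(r, c):
--         # Check horizontal line
--         horizontal_count = 1
--         for i in range(c-1, -1, -1):
--             if input_grid[r][i] == 1: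
--                 horizontal_count += 1
--             else:
--                 break
--         for i in range(c+1, cols):
--             if input_grid[r][i] == 1:
--                 horizontal_count += 1
--             else:
--                 break
--         if horizontal_count >= 3:
--             return True
--
--         # Check vertical line
--         vertical_count = 1
--         for i in range(r-1, -1, -1):
--             if input_grid[i][c] == 1:
--                 vertical_count += 1
--             else:
--                 break
--         for i in range(r+1, rows):
--             if input_grid[i][c] == 1:
--                 vertical_count += 1
--             else:
--                 break
--         if vertical_count >= 3:
--             return True
--
--         return False
--
--     # Apply the transformation rules to each cell
--     for r in range(rows):
--         for c in range(cols):
--             if input_grid[r][c] == 1: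
--                 # If the cell is part of a line, transform it to 2
--                 if is_part_of_line(r, c):
--                     output_grid[r][c] = 2
--                 else:
--                     output_grid[r][c] = 1
--             else:
--                 output_grid[r][c] = 0  # Preserve zeros
--
--     return output_grid
-- ===== SOURCE B (Python) =====
-- def solve(input_grid):
--     rows = len(input_grid)
--     cols = len(input_grid[0]) if rows > 0 else 0
--     grid = [row[:cols] for row in input_grid]
--
--     def ends(line):
--         # res[i] = length of the consecutive run of 1s ending at i (0 if line[i] != 1)
--         res = []
--         run = 0
--         for x in line:
--             run = run + 1 if x == 1 else 0
--             res.append(run)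
--         return res
--
--     def starts(line):
--         return ends(line[::-1])[::-1]
--
--     hL = [ends(row) for row in grid]
--     hR = [starts(row) for row in grid]
--     columns = [[grid[r][c] for r in range(rows)] for c in range(cols)]
--     vL = [ends(col) for col in columns]
--     vR = [starts(col) for col in columns]
--
--     out = []
--     for r in range(rows):
--         out_row = []
--         for c in range(cols):
--             x = grid[r][c]
--             if x == 1 and (hL[r][c] + hR[r][c] - 1 >= 3 or vL[c][r] + vR[c][r] - 1 >= 3):
--                 out_row.append(2)
--             elif x == 1:
--                 out_row.append(1)
--             else:
--                 out_row.append(0)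
--         out.append(out_row)
--     return out
-- ===== Notes on version B (the rewrite author's own statement) =====
-- stated objective: alternative
-- what changed: Replaces A's per-cell bidirectional break-scans (re-scanning the row and column from every 1-cell) with two run-length passes per row and per column (prefix run lengths and suffix run lengths), then a single lookup per cell.
import Mathlib
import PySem

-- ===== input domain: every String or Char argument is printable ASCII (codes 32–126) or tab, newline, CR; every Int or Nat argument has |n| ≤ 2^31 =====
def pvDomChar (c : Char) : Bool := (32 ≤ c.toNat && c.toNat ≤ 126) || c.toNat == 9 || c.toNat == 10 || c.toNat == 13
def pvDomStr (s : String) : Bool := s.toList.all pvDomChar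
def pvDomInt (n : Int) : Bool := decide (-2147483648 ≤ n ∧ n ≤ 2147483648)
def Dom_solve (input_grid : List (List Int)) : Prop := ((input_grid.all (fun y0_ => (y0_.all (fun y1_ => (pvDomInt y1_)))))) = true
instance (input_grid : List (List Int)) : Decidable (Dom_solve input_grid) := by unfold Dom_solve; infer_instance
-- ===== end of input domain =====

-- B replaces A's per-cell bidirectional break-scans by per-line run-length prefix/suffix passes with one lookup per cell (alternative algorithm).

-- ===== PORT A =====
-- input_grid[r][c]; exact within Pre_solve (all indices used are in range there)
def pvCell (g : List (List Int)) (r c : Nat) : Int := (g.getD r []).getD c 0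

-- 'for i in range(c-1, -1, -1): if get(i)==1: count+=1 else: break' (count of consecutive 1s at indices c-1..0)
def pvCntBack (get : Nat → Int) : Nat → Nat
  | 0 => 0
  | c+1 => if get c == 1 then pvCntBack get c + 1 else 0

-- 'for i in range(i0, i0+fuel): if get(i)==1: count+=1 else: break'
def pvCntFwd (get : Nat → Int) : Nat → Nat → Nat
  | _, 0 => 0
  | i, f+1 => if get i == 1 then pvCntFwd get (i+1) f + 1 else 0

def solve (input_grid : List (List Int)) : List (List Int) :=
  let rows := input_grid.length
  let cols := (input_grid.headD []).length
  let isPart : Nat → Nat → Bool := fun r c =>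
    let hcount := 1 + pvCntBack (fun i => pvCell input_grid r i) c
                    + pvCntFwd (fun i => pvCell input_grid r i) (c+1) (cols - (c+1))
    if hcount ≥ 3 then true
    else
      let vcount := 1 + pvCntBack (fun i => pvCell input_grid i c) r
                      + pvCntFwd (fun i => pvCell input_grid i c) (r+1) (rows - (r+1))
      decide (vcount ≥ 3)
  (List.range rows).map (fun r => (List.range cols).map (fun c =>
    if pvCell input_grid r c == 1 then (if isPart r c then 2 else 1) else (0 : Int)))

-- ===== PORT B =====
-- the 'run' accumulator loop of ends()
def pvEndsGo : List Int → Nat → List Nat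
  | [], _ => []
  | x :: xs, run => (if x == 1 then run + 1 else 0) :: pvEndsGo xs (if x == 1 then run + 1 else 0)

def pvEnds (line : List Int) : List Nat := pvEndsGo line 0

def pvStarts (line : List Int) : List Nat := (pvEnds line.reverse).reverse

def solve_alt (input_grid : List (List Int)) : List (List Int) :=
  let rows := input_grid.length
  let cols := (input_grid.headD []).length
  let grid := input_grid.map (fun row => row.take cols)
  let hL := grid.map pvEnds
  let hR := grid.map pvStarts
  let columns := (List.range cols).map (fun c => (List.range rows).map (fun r => (grid.getD r []).getD c 0))
  let vL := columns.map pvEnds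
  let vR := columns.map pvStarts
  (List.range rows).map (fun r => (List.range cols).map (fun c =>
    let x := (grid.getD r []).getD c 0
    if x == 1 &&
       (decide ((hL.getD r []).getD c 0 + (hR.getD r []).getD c 0 - 1 ≥ 3) ||
        decide ((vL.getD c []).getD r 0 + (vR.getD c []).getD r 0 - 1 ≥ 3)) then 2
    else if x == 1 then 1 else (0 : Int)))

-- ===== PRECONDITION & SPEC =====
-- Pre_ excludes exactly the grids with a row shorter than the first row, on which A raises IndexError.
def Pre_solve (input_grid : List (List Int)) : Prop :=
  ∀ row ∈ input_grid, (input_grid.headD []).length ≤ row.length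

instance (input_grid : List (List Int)) : Decidable (Pre_solve input_grid) := by unfold Pre_solve; infer_instance

def pvWitness_solve : List (List Int) := [[1, 1, 1], [0, 1, 0], [0, 1, 2]]

def Spec_solve (input_grid : List (List Int)) (out : List (List Int)) : Prop := out = solve_alt input_grid
instance (input_grid : List (List Int)) (out : List (List Int)) : Decidable (Spec_solve input_grid out) := by unfold Spec_solve; infer_instance

-- ===== CLAIM (what is proved, stated in full; the proofs are below) =====
def Claim_equal_solve : Prop := ∀ (input_grid : List (List Int)), Dom_solve input_grid → Pre_solve input_grid → Spec_solve input_grid (solve input_grid)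

-- ===== LEMMAS AND PROOFS =====

theorem pvGetD_take {α : Type} (l : List α) (n i : Nat) (d : α) (h : i < n) :
    (l.take n).getD i d = l.getD i d := by
  simp [List.getD, h]

theorem pvGetD_reverse {α : Type} (l : List α) (i : Nat) (d : α) (h : i < l.length) :
    l.reverse.getD i d = l.getD (l.length - 1 - i) d := by
  have h2 : l.length - 1 - i < l.length := by omega
  rw [List.getD_eq_getElem l.reverse d (by simpa using h), List.getD_eq_getElem l d h2,
    List.getElem_reverse]

theorem pvGetD_map_range {α : Type} (f : Nat → α) (n i : Nat) (d : α) (h : i < n) :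
    (((List.range n).map f).getD i d) = f i := by
  rw [List.getD_eq_getElem _ d (by simpa using h)]
  simp

theorem pvGetD_map {α β : Type} (f : α → β) (l : List α) (i : Nat) (d : β) (e : α)
    (h : i < l.length) : (l.map f).getD i d = f (l.getD i e) := by
  rw [List.getD_eq_getElem _ d (by simpa using h), List.getD_eq_getElem _ e h]
  simp

theorem pvEndsGo_length (l : List Int) (run : Nat) : (pvEndsGo l run).length = l.length := by
  induction l generalizing run with
  | nil => rfl
  | cons x xs ih => simp [pvEndsGo, ih]

theorem pvEndsGo_getD_succ (l : List Int) (run c : Nat) :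
    (pvEndsGo l run).getD (c+1) 0 =
      if l.getD (c+1) 0 == 1 then (pvEndsGo l run).getD c 0 + 1 else 0 := by
  induction l generalizing run c with
  | nil => simp [pvEndsGo, List.getD]
  | cons x xs ih =>
    cases c with
    | zero =>
      cases xs with
      | nil => simp [pvEndsGo, List.getD]
      | cons y ys => simp [pvEndsGo, List.getD]
    | succ c' =>
      simpa [pvEndsGo, List.getD] using ih (if x == 1 then run + 1 else 0) c'

theorem pvEnds_getD (l : List Int) (c : Nat) :
    (pvEnds l).getD c 0 =
      if l.getD c 0 == 1 then pvCntBack (fun i => l.getD i 0) c + 1 else 0 := by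
  induction c with
  | zero =>
    cases l with
    | nil => simp [pvEnds, pvEndsGo, List.getD]
    | cons x xs => simp [pvEnds, pvEndsGo, pvCntBack, List.getD]
  | succ c' ih =>
    rw [pvEnds] at ih ⊢
    rw [pvEndsGo_getD_succ, ih]
    by_cases h1 : l.getD (c'+1) 0 == 1 <;> by_cases h2 : l.getD c' 0 == 1 <;>
      simp [pvCntBack, *]

theorem pvCntBack_rev (l : List Int) (k : Nat) (hk : k ≤ l.length) :
    pvCntBack (fun i => l.reverse.getD i 0) k =
      pvCntFwd (fun i => l.getD i 0) (l.length - k) k := by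
  induction k with
  | zero => simp [pvCntBack, pvCntFwd]
  | succ k' ih =>
    have h2 : l.length - 1 - k' = l.length - (k' + 1) := by omega
    have h3 : l.length - (k' + 1) + 1 = l.length - k' := by omega
    rw [pvCntBack, pvCntFwd.eq_def]
    simp only
    rw [pvGetD_reverse l k' 0 (by omega), ih (by omega), h2, h3]

theorem pvStarts_getD (l : List Int) (c : Nat) (h : c < l.length) :
    (pvStarts l).getD c 0 =
      if l.getD c 0 == 1 then pvCntFwd (fun i => l.getD i 0) (c+1) (l.length - (c+1)) + 1 else 0 := by
  have hlen : (pvEnds l.reverse).length = l.length := by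
    simp [pvEnds, pvEndsGo_length]
  rw [pvStarts, pvGetD_reverse _ c 0 (by omega), hlen, pvEnds_getD,
    pvGetD_reverse l _ 0 (by omega)]
  have e1 : l.length - 1 - (l.length - 1 - c) = c := by omega
  rw [e1, pvCntBack_rev l (l.length - 1 - c) (by omega)]
  have e2 : l.length - (l.length - 1 - c) = c + 1 := by omega
  have e3 : l.length - 1 - c = l.length - (c + 1) := by omega
  rw [e2, e3]

theorem pvCntBack_congr (get get' : Nat → Int) (c : Nat) (h : ∀ i, i < c → get i = get' i) :
    pvCntBack get c = pvCntBack get' c := by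
  induction c with
  | zero => rfl
  | succ c' ih =>
    rw [pvCntBack, pvCntBack, h c' (by omega), ih (fun i hi => h i (by omega))]

theorem pvCntFwd_congr (get get' : Nat → Int) (i f : Nat) (h : ∀ j, i ≤ j → j < i + f → get j = get' j) :
    pvCntFwd get i f = pvCntFwd get' i f := by
  induction f generalizing i with
  | zero => rfl
  | succ f' ih =>
    rw [pvCntFwd, pvCntFwd, h i (by omega) (by omega),
      ih (i+1) (fun j h1 h2 => h j (by omega) (by omega))]

theorem solve_cell (g : List (List Int)) (hpre : Pre_solve g) (r c : Nat)
    (hr : r < g.length) (hc : c < (g.headD []).length) :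
    (if pvCell g r c == 1 then
      (if (if 1 + pvCntBack (fun i => pvCell g r i) c
              + pvCntFwd (fun i => pvCell g r i) (c+1) ((g.headD []).length - (c+1)) ≥ 3 then true
           else decide (1 + pvCntBack (fun i => pvCell g i c) r
              + pvCntFwd (fun i => pvCell g i c) (r+1) (g.length - (r+1)) ≥ 3)) then 2 else 1)
     else (0 : Int)) =
    (let rows := g.length
     let cols := (g.headD []).length
     let grid := g.map (fun row => row.take cols)
     let hL := grid.map pvEnds
     let hR := grid.map pvStarts
     let columns := (List.range cols).map (fun c => (List.range rows).map (fun r => (grid.getD r []).getD c 0))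
     let vL := columns.map pvEnds
     let vR := columns.map pvStarts
     let x := (grid.getD r []).getD c 0
     if x == 1 &&
        (decide ((hL.getD r []).getD c 0 + (hR.getD r []).getD c 0 - 1 ≥ 3) ||
         decide ((vL.getD c []).getD r 0 + (vR.getD c []).getD r 0 - 1 ≥ 3)) then 2
     else if x == 1 then 1 else (0 : Int)) := by
  simp only
  set rows := g.length with hrows
  set cols := (g.headD []).length with hcols
  set grid := g.map (fun row => row.take cols) with hgrid
  set col := (List.range rows).map (fun r => (grid.getD r []).getD c 0) with hcoldef
  -- the selected row, truncated
  have hgridr : grid.getD r [] = (g.getD r []).take cols := by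
    rw [hgrid, pvGetD_map _ g r [] [] hr]
  have hrowlen : cols ≤ (g.getD r []).length := by
    apply hpre
    rw [List.getD_eq_getElem g [] hr]
    exact List.getElem_mem hr
  have hrowTlen : ((g.getD r []).take cols).length = cols := by
    rw [List.length_take]; omega
  have hrowT : ∀ i, i < cols → ((g.getD r []).take cols).getD i 0 = pvCell g r i := by
    intro i hi
    rw [pvGetD_take _ cols i 0 hi]; rfl
  -- the selected column
  have hcollen : col.length = rows := by simp [hcoldef]
  have hcol : ∀ i, col.getD i 0 = pvCell g i c := by
    intro i
    by_cases hi : i < rows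
    · rw [hcoldef, pvGetD_map_range _ rows i 0 hi, pvGetD_map _ g i [] [] hi,
        pvGetD_take _ cols c 0 hc]
      rfl
    · rw [List.getD_eq_default _ _ (by omega), pvCell,
        List.getD_eq_default g _ (by rw [← hrows]; omega)]
      rfl
  -- lookups
  have hhL : ((grid.map pvEnds).getD r []).getD c 0 =
      if pvCell g r c == 1 then pvCntBack (fun i => pvCell g r i) c + 1 else 0 := by
    rw [pvGetD_map pvEnds grid r [] [] (by simpa [hgrid] using hr), hgridr, pvEnds_getD,
      pvGetD_take _ cols c 0 hc,
      pvCntBack_congr _ (fun i => pvCell g r i) c (fun i hi => hrowT i (by omega))]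
    rfl
  have hhR : ((grid.map pvStarts).getD r []).getD c 0 =
      if pvCell g r c == 1 then
        pvCntFwd (fun i => pvCell g r i) (c+1) (cols - (c+1)) + 1 else 0 := by
    rw [pvGetD_map pvStarts grid r [] [] (by simpa [hgrid] using hr), hgridr,
      pvStarts_getD _ c (by rw [hrowTlen]; exact hc), hrowTlen,
      pvGetD_take _ cols c 0 hc,
      pvCntFwd_congr _ (fun i => pvCell g r i) (c+1) (cols - (c+1))
        (fun j h1 h2 => hrowT j (by omega))]
    rfl
  have hvL : ((((List.range cols).map (fun c => (List.range rows).map (fun r => (grid.getD r []).getD c 0))).map pvEnds).getD c []).getD r 0 =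
      if pvCell g r c == 1 then pvCntBack (fun i => pvCell g i c) r + 1 else 0 := by
    rw [pvGetD_map pvEnds _ c [] [] (by simpa using hc), pvGetD_map_range _ cols c [] hc,
      ← hcoldef, pvEnds_getD, hcol r,
      pvCntBack_congr _ (fun i => pvCell g i c) r (fun i hi => hcol i)]
  have hvR : ((((List.range cols).map (fun c => (List.range rows).map (fun r => (grid.getD r []).getD c 0))).map pvStarts).getD c []).getD r 0 =
      if pvCell g r c == 1 then
        pvCntFwd (fun i => pvCell g i c) (r+1) (rows - (r+1)) + 1 else 0 := by
    rw [pvGetD_map pvStarts _ c [] [] (by simpa using hc), pvGetD_map_range _ cols c [] hc,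
      ← hcoldef, pvStarts_getD _ r (by omega), hcollen, hcol r,
      pvCntFwd_congr _ (fun i => pvCell g i c) (r+1) (rows - (r+1))
        (fun j h1 h2 => hcol j)]
  have hx : (grid.getD r []).getD c 0 = pvCell g r c := by
    rw [hgridr]; exact hrowT c hc
  rw [hx, hhL, hhR, hvL, hvR]
  by_cases h1 : pvCell g r c = 1
  · simp only [h1, beq_self_eq_true, if_true, Bool.true_and]
    by_cases hh : 1 + pvCntBack (fun i => pvCell g r i) c
        + pvCntFwd (fun i => pvCell g r i) (c+1) (cols - (c+1)) ≥ 3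
    · simp [hh]
      omega
    · by_cases hv : 1 + pvCntBack (fun i => pvCell g i c) r
          + pvCntFwd (fun i => pvCell g i c) (r+1) (rows - (r+1)) ≥ 3
      · simp [hh, hv]
        omega
      · simp [hh, hv]
        omega
  · simp [h1]

theorem solve_spec : Claim_equal_solve := by
  intro g _ hpre
  unfold Spec_solve solve solve_alt
  simp only
  apply List.map_congr_left
  intro r hr
  apply List.map_congr_left
  intro c hc
  exact solve_cell g hpre r c (List.mem_range.mp hr) (List.mem_range.mp hc)
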